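-- pv_equiv track=rewrite | github.com/936968629/leetcode | 213.py | single_rob
-- ===== SOURCE A (Python) =====
-- def single_rob(first,last,nums):
--     pre = 0
--     ppre = 0
--     for i in range(first,last):
--         if ppre+nums[i] >= pre:
--             ppre,pre = pre, ppre+nums[i]
--         else:
--             ppre = pre
--     return pre
-- ===== SOURCE B (Python) =====
-- def single_rob(first, last, nums):
--     # Top-down evaluation of rob(i) = max(rob(i-1), rob(i-2) + nums[i]) (rob(j) = 0 for j < first),
--     # memoized in a dict and driven by an explicit stack (no recursion-depth limit).
--     memo = {}
--     stack = [last - 1]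
--     while stack:
--         i = stack[-1]
--         if i < first or i in memo:
--             stack.pop()
--         elif i - 1 >= first and (i - 1) not in memo:
--             stack.append(i - 1)
--         else:
--             memo[i] = max(memo.get(i - 1, 0), memo.get(i - 2, 0) + nums[i])
--             stack.pop()
--     return memo.get(last - 1, 0)
-- ===== Notes on version B (the rewrite author's own statement) =====
-- stated objective: alternative
-- what changed: A's forward loop with two rolling variables is replaced by a top-down, stack-driven memoized evaluation of the recurrence rob(i) = max(rob(i-1), rob(i-2) + nums[i]) in a dict, returning memo-lookup of last-1 (0 for an empty range); Pre_ excludes only the inputs where nums[i] raises IndexError for some i in range(first, last).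
import Mathlib
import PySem

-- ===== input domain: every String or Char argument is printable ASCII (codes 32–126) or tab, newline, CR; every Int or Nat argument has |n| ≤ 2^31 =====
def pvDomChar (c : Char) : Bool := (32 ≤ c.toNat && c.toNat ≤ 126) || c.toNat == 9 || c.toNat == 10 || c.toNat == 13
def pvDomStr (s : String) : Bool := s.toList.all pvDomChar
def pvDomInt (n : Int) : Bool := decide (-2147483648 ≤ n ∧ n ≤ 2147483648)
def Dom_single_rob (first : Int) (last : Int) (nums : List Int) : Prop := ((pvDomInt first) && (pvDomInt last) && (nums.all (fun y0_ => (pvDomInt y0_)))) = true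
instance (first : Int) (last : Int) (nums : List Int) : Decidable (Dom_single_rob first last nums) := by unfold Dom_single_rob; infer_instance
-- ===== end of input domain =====

-- B replaces A's forward loop with rolling variables by a top-down, stack-driven memoized
-- evaluation of the recurrence rob(i) = max(rob(i-1), rob(i-2) + nums[i]) (objective: alternative).

-- ===== PORT A =====
-- loop body of A's 'for i in range(first, last)': state is (ppre, pre)
def stepA (nums : List Int) (st : Int × Int) (i : Int) : Int × Int :=
  if st.1 + PySem.List.pyGetD nums i 0 ≥ st.2 then (st.2, st.1 + PySem.List.pyGetD nums i 0)
  else (st.2, st.2)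

def single_rob (first : Int) (last : Int) (nums : List Int) : Int :=
  ((PySem.List.pyRange first last 1).foldl (stepA nums) ((0 : Int), (0 : Int))).2

-- ===== PORT B =====
-- B's while loop: head of the list is the top of the Python stack; fuel only makes the
-- recursion structural (single_rob_alt supplies enough fuel for the loop to finish).
def robLoop (first : Int) (nums : List Int) : Nat → List Int → PySem.Dict Int Int → PySem.Dict Int Int
  | _, [], memo => memo
  | 0, _ :: _, memo => memo
  | fuel + 1, i :: stack, memo =>
    if i < first ∨ memo.contains i = true then
      robLoop first nums fuel stack memo
    else if first ≤ i - 1 ∧ ¬ memo.contains (i - 1) = true then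
      robLoop first nums fuel ((i - 1) :: i :: stack) memo
    else
      robLoop first nums fuel stack
        (memo.insert i (max (memo.getD (i - 1) 0) (memo.getD (i - 2) 0 + PySem.List.pyGetD nums i 0)))

def single_rob_alt (first : Int) (last : Int) (nums : List Int) : Int :=
  (robLoop first nums (2 * (last - first).toNat + 2) [last - 1] PySem.Dict.empty).getD (last - 1) 0

-- ===== PRECONDITION & SPEC =====
-- Pre_ excludes exactly the inputs where Python's nums[i] raises IndexError for some i in range(first, last).
def Pre_single_rob (first : Int) (last : Int) (nums : List Int) : Prop :=
  last ≤ first ∨ (-(nums.length : Int) ≤ first ∧ last ≤ (nums.length : Int))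
instance (first : Int) (last : Int) (nums : List Int) : Decidable (Pre_single_rob first last nums) := by unfold Pre_single_rob; infer_instance

def pvWitness_single_rob : Int × Int × List Int := (0, 3, [2, 7, 9])

def Spec_single_rob (first : Int) (last : Int) (nums : List Int) (out : Int) : Prop := out = single_rob_alt first last nums
instance (first : Int) (last : Int) (nums : List Int) (out : Int) : Decidable (Spec_single_rob first last nums out) := by unfold Spec_single_rob; infer_instance

-- ===== CLAIM (what is proved, stated in full; the proofs are below) =====
def Claim_equal_single_rob : Prop := ∀ (first : Int) (last : Int) (nums : List Int), Dom_single_rob first last nums → Pre_single_rob first last nums → Spec_single_rob first last nums (single_rob first last nums)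

-- ===== LEMMAS AND PROOFS =====

-- A's rolling state after k iterations
def stA (first : Int) (nums : List Int) : Nat → Int × Int
  | 0 => (0, 0)
  | k + 1 => stepA nums (stA first nums k) (first + k)

-- value of the recurrence at index i (= A's 'pre' after processing indices first..i)
def specR (first : Int) (nums : List Int) (i : Int) : Int := (stA first nums (i - first + 1).toNat).2

-- the memo dict after all of first..j-1 have been computed
def Mdict (first : Int) (nums : List Int) (j : Int) : PySem.Dict Int Int :=
  (PySem.List.pyRange first j 1).foldl (fun d k => d.insert k (specR first nums k)) PySem.Dict.empty

theorem specR_toNat (first : Int) (nums : List Int) (i : Int) (n : Nat) (h : (i - first + 1).toNat = n) :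
    specR first nums i = (stA first nums n).2 := by
  unfold specR; rw [h]

theorem specR_of_lt (first : Int) (nums : List Int) (i : Int) (h : i < first) : specR first nums i = 0 := by
  rw [specR_toNat first nums i 0 (by omega)]; rfl

theorem stA_fst (first : Int) (nums : List Int) (k : Nat) :
    (stA first nums (k + 1)).1 = (stA first nums k).2 := by
  show (stepA nums (stA first nums k) (first + k)).1 = _
  unfold stepA
  split <;> rfl

theorem specR_rec (first : Int) (nums : List Int) (i : Int) (h : first ≤ i) :
    specR first nums i =
      max (specR first nums (i - 1)) (specR first nums (i - 2) + PySem.List.pyGetD nums i 0) := by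
  obtain ⟨k, hk⟩ : ∃ k : Nat, i = first + k := ⟨(i - first).toNat, by omega⟩
  subst hk
  have hfst : specR first nums (first + (k : Int) - 2) = (stA first nums k).1 := by
    cases k with
    | zero => rw [specR_toNat first nums _ 0 (by omega)]; rfl
    | succ m => rw [specR_toNat first nums _ m (by omega), stA_fst]
  rw [specR_toNat first nums _ (k + 1) (by omega), specR_toNat first nums _ k (by omega), hfst]
  show (stepA nums (stA first nums k) (first + k)).2 = _
  unfold stepA
  rcases le_or_gt ((stA first nums k).1 + PySem.List.pyGetD nums (first + (k : Int)) 0) ((stA first nums k).2) with hle | hgt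
  · rcases eq_or_lt_of_le hle with he | hlt
    · simp [he]
    · rw [if_neg (by omega)]
      show (stA first nums k).2 = _
      rw [max_eq_left (by omega)]
  · rw [if_pos (by omega)]
    show (stA first nums k).1 + _ = _
    rw [max_eq_right (by omega)]

theorem foldA (first : Int) (nums : List Int) (k : Nat) :
    ((PySem.List.pyRange first (first + k) 1).foldl (stepA nums) ((0 : Int), (0 : Int))) = stA first nums k := by
  induction k with
  | zero =>
    rw [PySem.List.pyRange_one_eq_nil (by omega : first + ((0 : Nat) : Int) ≤ first)]
    rfl
  | succ m ih =>
    have hc : first + ((m + 1 : Nat) : Int) = (first + m) + 1 := by push_cast; ring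
    rw [hc, PySem.List.pyRange_one_succ_right (by omega), List.foldl_append, ih]
    rfl

theorem single_rob_eq (first : Int) (last : Int) (nums : List Int) :
    single_rob first last nums = specR first nums (last - 1) := by
  unfold single_rob
  rcases le_or_gt last first with hle | hlt
  · rw [PySem.List.pyRange_one_eq_nil hle, specR_toNat first nums _ 0 (by omega)]
    rfl
  · rw [specR_toNat first nums _ ((last - first).toNat) (by omega),
      show PySem.List.pyRange first last 1 = PySem.List.pyRange first (first + ((last - first).toNat : Int)) 1 from by
        rw [show first + ((last - first).toNat : Int) = last from by omega],
      foldA]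

theorem Mdict_self (first : Int) (nums : List Int) : Mdict first nums first = PySem.Dict.empty := by
  unfold Mdict
  rw [PySem.List.pyRange_one_eq_nil (le_refl first)]
  rfl

theorem Mdict_succ (first : Int) (nums : List Int) (j : Int) (h : first ≤ j) :
    Mdict first nums (j + 1) = (Mdict first nums j).insert j (specR first nums j) := by
  unfold Mdict
  rw [PySem.List.pyRange_one_succ_right h, List.foldl_append]
  rfl

theorem get?_Mdict_aux (first : Int) (nums : List Int) : ∀ (k : Nat) (x : Int),
    (Mdict first nums (first + (k : Int))).get? x
      = if first ≤ x ∧ x < first + (k : Int) then some (specR first nums x) else none := by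
  intro k
  induction k with
  | zero =>
    intro x
    simp only [Nat.cast_zero, add_zero]
    rw [Mdict_self, if_neg (by omega)]
    simp [PySem.Dict.get?_empty]
  | succ m ih =>
    intro x
    have hc : first + ((m + 1 : Nat) : Int) = (first + (m : Int)) + 1 := by push_cast; ring
    rw [hc, Mdict_succ first nums _ (by omega), PySem.Dict.get?_insert]
    rcases eq_or_ne x (first + (m : Int)) with he | hne
    · subst he
      rw [if_pos rfl, if_pos (by omega)]
    · rw [if_neg hne, ih x]
      split_ifs with h1 h2 <;> first | rfl | omega

theorem get?_Mdict (first : Int) (nums : List Int) (j : Int) (x : Int) :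
    (Mdict first nums j).get? x = if first ≤ x ∧ x < j then some (specR first nums x) else none := by
  rcases le_or_gt j first with hle | hlt
  · unfold Mdict
    rw [PySem.List.pyRange_one_eq_nil hle, if_neg (by omega)]
    simp [PySem.Dict.get?_empty]
  · rw [show j = first + (((j - first).toNat : Nat) : Int) from by omega, get?_Mdict_aux]

theorem getD_Mdict (first : Int) (nums : List Int) (j : Int) (x : Int) :
    (Mdict first nums j).getD x 0 = if first ≤ x ∧ x < j then specR first nums x else 0 := by
  rw [PySem.Dict.getD_eq_get?_getD, get?_Mdict]
  split_ifs <;> rfl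

theorem contains_Mdict (first : Int) (nums : List Int) (j : Int) (x : Int) :
    (Mdict first nums j).contains x = decide (first ≤ x ∧ x < j) := by
  rw [PySem.Dict.contains_eq_isSome_get?, get?_Mdict]
  split_ifs with h <;> simp [h]

theorem run_up (first : Int) (last : Int) (nums : List Int) :
    ∀ (k : Nat) (j : Int) (fuel : Nat), first ≤ j → j + k = last → k ≤ fuel →
      robLoop first nums fuel (PySem.List.pyRange j last 1) (Mdict first nums j) = Mdict first nums last := by
  intro k
  induction k with
  | zero =>
    intro j fuel hj hlast _
    have hj' : j = last := by omega
    subst hj'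
    rw [PySem.List.pyRange_one_eq_nil (le_refl j)]
    cases fuel <;> rfl
  | succ m ih =>
    intro j fuel hj hlast hfuel
    obtain ⟨f, rfl⟩ : ∃ f, fuel = f + 1 := ⟨fuel - 1, by omega⟩
    have hcon1 : ¬ (j < first ∨ (Mdict first nums j).contains j = true) := by
      rw [contains_Mdict]
      simp only [decide_eq_true_eq]
      omega
    have hcon2 : ¬ (first ≤ j - 1 ∧ ¬ (Mdict first nums j).contains (j - 1) = true) := by
      rw [contains_Mdict]
      simp only [decide_eq_true_eq]
      omega
    have hA : (Mdict first nums j).getD (j - 1) 0 = specR first nums (j - 1) := by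
      rw [getD_Mdict]
      split_ifs with h
      · rfl
      · rw [specR_of_lt first nums _ (by omega)]
    have hB : (Mdict first nums j).getD (j - 2) 0 = specR first nums (j - 2) := by
      rw [getD_Mdict]
      split_ifs with h
      · rfl
      · rw [specR_of_lt first nums _ (by omega)]
    rw [PySem.List.pyRange_one_cons (by omega : j < last), robLoop, if_neg hcon1, if_neg hcon2, hA, hB,
      ← specR_rec first nums j hj, ← Mdict_succ first nums j hj]
    exact ih (j + 1) f (by omega) (by omega) (by omega)

theorem run_desc (first : Int) (last : Int) (nums : List Int) :
    ∀ (d : Nat) (t : Int) (fuel : Nat), t = first + d → t < last → d + (last - first).toNat ≤ fuel →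
      robLoop first nums fuel (PySem.List.pyRange t last 1) PySem.Dict.empty = Mdict first nums last := by
  intro d
  induction d with
  | zero =>
    intro t fuel ht hlt hfuel
    have ht' : t = first := by omega
    subst ht'
    rw [← Mdict_self t nums]
    exact run_up t last nums (last - t).toNat t fuel (le_refl t) (by omega) (by omega)
  | succ m ih =>
    intro t fuel ht hlt hfuel
    obtain ⟨f, rfl⟩ : ∃ f, fuel = f + 1 := ⟨fuel - 1, by omega⟩
    have hcon1 : ¬ (t < first ∨ (PySem.Dict.empty : PySem.Dict Int Int).contains t = true) := by
      simp [PySem.Dict.contains_empty]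
      omega
    have hcon2 : first ≤ t - 1 ∧ ¬ (PySem.Dict.empty : PySem.Dict Int Int).contains (t - 1) = true := by
      refine ⟨by omega, ?_⟩
      simp [PySem.Dict.contains_empty]
    have hcons : (t - 1) :: t :: PySem.List.pyRange (t + 1) last 1 = PySem.List.pyRange (t - 1) last 1 := by
      rw [PySem.List.pyRange_one_cons (show t - 1 < last from by omega),
        show t - 1 + 1 = t from by omega,
        PySem.List.pyRange_one_cons (show t < last from by omega)]
    rw [PySem.List.pyRange_one_cons hlt, robLoop, if_neg hcon1, if_pos hcon2, hcons]
    exact ih (t - 1) f (by omega) (by omega) (by omega)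

theorem alt_eq (first : Int) (last : Int) (nums : List Int) :
    single_rob_alt first last nums = specR first nums (last - 1) := by
  unfold single_rob_alt
  rcases le_or_gt last first with hle | hlt
  · have hf : 2 * (last - first).toNat + 2 = 0 + 1 + 1 := by omega
    rw [hf, robLoop, if_pos (Or.inl (by omega : last - 1 < first))]
    rw [specR_of_lt first nums _ (by omega)]
    rfl
  · have hsing : [last - 1] = PySem.List.pyRange (last - 1) last 1 := by
      rw [PySem.List.pyRange_one_cons (show last - 1 < last from by omega),
        show last - 1 + 1 = last from by omega,
        PySem.List.pyRange_one_eq_nil (le_refl last)]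
    rw [hsing,
      run_desc first last nums (last - 1 - first).toNat (last - 1) _ (by omega) (by omega) (by omega),
      getD_Mdict, if_pos (by omega)]

-- ===== VERDICT (by name: the statement is the Claim_ definition above) =====
theorem single_rob_spec : Claim_equal_single_rob := by
  intro first last nums _ _
  show single_rob first last nums = single_rob_alt first last nums
  rw [single_rob_eq, alt_eq]
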